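-- pv_equiv track=rewrite | github.com/cfmessias/music4all | views/testes/explore_page.py | _subtree_edges
-- ===== SOURCE A (Python) =====
-- from collections import defaultdict, deque
-- from typing import Dict, List, Set, Tuple
-- from typing import List, Tuple, Set
--
-- def _subtree_edges(root: str, adj: Dict[str, Set[str]], depth: int) -> Set[Tuple[str, str]]:
--     """All edges from root down to depth (aux for highlight/branch-only)."""
--     seen_edges: Set[Tuple[str, str]] = set()
--     q = deque([(root, 0)])
--     while q:
--         u, d = q.popleft()
--         if d >= depth:
--             continue
--         for v in adj.get(u, set()):
--             seen_edges.add((u, v))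
--             q.append((v, d + 1))
--     return seen_edges
-- ===== SOURCE B (Python) =====
-- from collections import deque
--
-- def _subtree_edges(root, adj, depth):
--     """All edges from root down to depth: BFS that expands each node only once
--     (visited set), instead of re-expanding it along every path."""
--     seen_edges = set()
--     visited = {root}
--     q = deque([(root, 0)])
--     while q:
--         u, d = q.popleft()
--         if d >= depth:
--             continue
--         for v in adj.get(u, set()):
--             seen_edges.add((u, v))
--             if v not in visited:
--                 visited.add(v)
--                 q.append((v, d + 1))
--     return seen_edges
-- ===== Notes on version B (the rewrite author's own statement) =====
-- stated objective: faster
-- what changed: B adds a visited set so each node is expanded only on its first (shallowest) BFS encounter, instead of re-expanding it along every path from the root.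
import Mathlib
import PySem

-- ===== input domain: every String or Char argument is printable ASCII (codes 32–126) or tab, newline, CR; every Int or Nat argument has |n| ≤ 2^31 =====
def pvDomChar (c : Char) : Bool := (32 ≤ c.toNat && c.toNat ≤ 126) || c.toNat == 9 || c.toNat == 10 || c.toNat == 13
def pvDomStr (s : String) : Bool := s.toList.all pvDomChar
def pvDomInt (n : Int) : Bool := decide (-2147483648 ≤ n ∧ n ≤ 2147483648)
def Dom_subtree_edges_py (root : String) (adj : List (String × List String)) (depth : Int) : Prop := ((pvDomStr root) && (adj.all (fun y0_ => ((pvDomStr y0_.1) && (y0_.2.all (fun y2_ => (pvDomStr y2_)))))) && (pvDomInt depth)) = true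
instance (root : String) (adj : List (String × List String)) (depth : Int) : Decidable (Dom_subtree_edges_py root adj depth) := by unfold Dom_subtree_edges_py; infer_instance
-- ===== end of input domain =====

-- B replaces A's exhaustive path-by-path BFS by a BFS with a visited set (each node expanded only
-- on its first, shallowest encounter); objective: faster.

-- ===== PORT A =====

-- neighbours lookup: adj.get(u, set())
def pvNbrs (adj : List (String × List String)) (u : String) : List String :=
  (PySem.Dict.mk adj).getD u []

-- bound on the length of any neighbour list (for loopA's termination measure)
def pvKmax (adj : List (String × List String)) : Nat :=
  (adj.map (fun p => p.2.length)).foldr max 0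

lemma pvNbrs_len_le (adj : List (String × List String)) (u : String) :
    (pvNbrs adj u).length ≤ pvKmax adj := by
  induction adj with
  | nil => simp [pvNbrs, pvKmax, PySem.Dict.getD, PySem.Dict.get?]
  | cons p rest ih =>
    obtain ⟨k, vs⟩ := p
    simp only [pvNbrs, PySem.Dict.getD_eq_get?_getD, PySem.Dict.get?_mk_cons] at *
    by_cases h : (k == u)
    · simp [h, pvKmax]
    · simp only [h]
      simp only [pvKmax, List.map_cons, List.foldr_cons]
      exact le_trans ih (Nat.le_max_right _ _)

def pvMeasA (depth : Int) (K : Nat) (q : List (String × Int)) : Nat :=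
  (q.map (fun p => (K + 1) ^ (depth - p.2).toNat)).sum

def pvAInner (u : String) (d : Int) (nbrs : List String)
    (q : List (String × Int)) (E : PySem.Set (String × String)) :
    List (String × Int) × PySem.Set (String × String) :=
  match nbrs with
  | [] => (q, E)
  | v :: vs => pvAInner u d vs (q ++ [(v, d + 1)]) (PySem.Set.add E (u, v))

lemma pvAInner_fst (u : String) (d : Int) :
    ∀ (nbrs : List String) q E,
      (pvAInner u d nbrs q E).1 = q ++ nbrs.map (fun v => (v, d + 1)) := by
  intro nbrs
  induction nbrs with
  | nil => intro q E; simp [pvAInner]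
  | cons v vs ih => intro q E; simp [pvAInner, ih]

lemma pvMeasA_dec_skip (depth : Int) (K : Nat) (u : String) (d : Int)
    (rest : List (String × Int)) :
    pvMeasA depth K rest < pvMeasA depth K ((u, d) :: rest) := by
  simp only [pvMeasA, List.map_cons, List.sum_cons]
  have : 0 < (K + 1) ^ (depth - d).toNat := pow_pos (Nat.succ_pos K) _
  omega

lemma pvMeasA_dec_expand (depth : Int) (K : Nat) (u : String) (d : Int)
    (rest : List (String × Int)) (nbrs : List String)
    (hd : d < depth) (hlen : nbrs.length ≤ K) :
    pvMeasA depth K (rest ++ nbrs.map (fun v => (v, d + 1))) <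
      pvMeasA depth K ((u, d) :: rest) := by
  simp only [pvMeasA, List.map_cons, List.sum_cons, List.map_append, List.sum_append]
  have hnew : ∀ (l : List String), ((l.map fun v => (v, d + 1)).map
      (fun p => (K + 1) ^ (depth - p.2).toNat)).sum
      = l.length * (K + 1) ^ (depth - (d + 1)).toNat := by
    intro l
    induction l with
    | nil => simp
    | cons v vs ih => simp only [List.map_cons, List.sum_cons, ih, List.length_cons]; ring
  rw [hnew]
  have ht : (depth - d).toNat = (depth - (d + 1)).toNat + 1 := by omega
  rw [ht, pow_succ]
  have hp : 0 < (K + 1) ^ (depth - (d + 1)).toNat := pow_pos (Nat.succ_pos K) _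
  have hml : nbrs.length * (K + 1) ^ (depth - (d + 1)).toNat
      < (K + 1) * (K + 1) ^ (depth - (d + 1)).toNat :=
    Nat.mul_lt_mul_of_pos_right (by omega) hp
  have hc : (K + 1) ^ (depth - (d + 1)).toNat * (K + 1)
      = (K + 1) * (K + 1) ^ (depth - (d + 1)).toNat := Nat.mul_comm _ _
  omega

def pvLoopA (adj : List (String × List String)) (depth : Int)
    (q : List (String × Int)) (E : PySem.Set (String × String)) :
    PySem.Set (String × String) :=
  match q with
  | [] => E
  | (u, d) :: rest =>
    if d ≥ depth then pvLoopA adj depth rest E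
    else
      let s := pvAInner u d (pvNbrs adj u) rest E
      pvLoopA adj depth s.1 s.2
termination_by pvMeasA depth (pvKmax adj) q
decreasing_by
  · exact pvMeasA_dec_skip _ _ _ _ _
  · rw [pvAInner_fst]
    exact pvMeasA_dec_expand _ _ _ _ _ _ (by omega) (pvNbrs_len_le adj u)

def subtree_edges_py (root : String) (adj : List (String × List String)) (depth : Int) : List (String × String) :=
  pvLoopA adj depth [(root, 0)] PySem.Set.empty

-- ===== PORT B =====
def pvAllN (adj : List (String × List String)) : List String :=
  adj.flatMap (fun p => p.2)

lemma mem_pvNbrs_allN (adj : List (String × List String)) (u v : String)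
    (h : v ∈ pvNbrs adj u) : v ∈ pvAllN adj := by
  induction adj with
  | nil => simp [pvNbrs, PySem.Dict.getD, PySem.Dict.get?] at h
  | cons p rest ih =>
    obtain ⟨k, vs⟩ := p
    simp only [pvNbrs, PySem.Dict.getD_eq_get?_getD, PySem.Dict.get?_mk_cons] at h ih
    by_cases hk : (k == u)
    · simp only [hk, if_pos, Option.getD_some] at h
      simp [pvAllN, h]
    · simp only [hk, Bool.false_eq_true, if_false] at h
      simp only [pvAllN, List.flatMap_cons, List.mem_append]
      exact Or.inr (ih h)

def pvCntAux (l : List String) (V : PySem.Set String) : Nat :=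
  (l.filter (fun x => !(decide (x ∈ V)))).length

def pvCnt (adj : List (String × List String)) (V : PySem.Set String) : Nat :=
  pvCntAux (pvAllN adj) V

lemma pvCntAux_le (l : List String) (V V' : PySem.Set String)
    (h : ∀ x, x ∈ V → x ∈ V') : pvCntAux l V' ≤ pvCntAux l V := by
  induction l with
  | nil => simp [pvCntAux]
  | cons a l ih =>
    by_cases ha : a ∈ V
    · have ha' : a ∈ V' := h a ha
      simpa [pvCntAux, List.filter_cons, ha, ha'] using ih
    · by_cases ha' : a ∈ V'
      · simp only [pvCntAux, List.filter_cons] at *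
        simp [ha, ha']
        omega
      · simp only [pvCntAux, List.filter_cons] at *
        simp [ha, ha']
        omega

lemma pvCntAux_lt (l : List String) (V V' : PySem.Set String) (v : String)
    (hv : v ∈ l) (h1 : v ∉ V) (h2 : v ∈ V') (hsub : ∀ x, x ∈ V → x ∈ V') :
    pvCntAux l V' < pvCntAux l V := by
  induction l with
  | nil => simp at hv
  | cons a l ih =>
    simp only [List.mem_cons] at hv
    rcases hv with rfl | hv
    · simp only [pvCntAux, List.filter_cons]
      simp [h1, h2]
      simpa [pvCntAux] using pvCntAux_le l V V' hsub
    · have hle := ih hv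
      have hle' := pvCntAux_le l V V' hsub
      by_cases haV : a ∈ V
      · have haV' : a ∈ V' := hsub a haV
        simpa [pvCntAux, List.filter_cons, haV, haV'] using hle
      · by_cases haV' : a ∈ V'
        · simp only [pvCntAux, List.filter_cons] at *
          simp [haV, haV']
          omega
        · simp only [pvCntAux, List.filter_cons] at *
          simp [haV, haV']
          omega

def pvBInner (u : String) (d : Int) (nbrs : List String)
    (q : List (String × Int)) (V : PySem.Set String)
    (E : PySem.Set (String × String)) :
    List (String × Int) × PySem.Set String × PySem.Set (String × String) :=
  match nbrs with
  | [] => (q, V, E)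
  | v :: vs =>
    let E' := PySem.Set.add E (u, v)
    if PySem.Set.contains V v then pvBInner u d vs q V E'
    else pvBInner u d vs (q ++ [(v, d + 1)]) (PySem.Set.add V v) E'

lemma pvBInner_dec (adj : List (String × List String)) (u : String) (d : Int) :
    ∀ (nbrs : List String) q V E, (∀ v ∈ nbrs, v ∈ pvAllN adj) →
      ((pvBInner u d nbrs q V E).2.1 = V ∧ (pvBInner u d nbrs q V E).1 = q)
      ∨ pvCnt adj (pvBInner u d nbrs q V E).2.1 < pvCnt adj V := by
  intro nbrs
  induction nbrs with
  | nil => intro q V E h; exact Or.inl ⟨rfl, rfl⟩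
  | cons v vs ih =>
    intro q V E h
    simp only [pvBInner]
    by_cases hc : PySem.Set.contains V v
    · simp only [hc, if_pos]
      exact ih q V _ (fun w hw => h w (List.mem_cons_of_mem _ hw))
    · simp only [hc, Bool.false_eq_true, if_false]
      have hvV : v ∉ V := fun hm => hc ((PySem.Set.contains_iff V v).mpr hm)
      have hVlt : pvCnt adj (PySem.Set.add V v) < pvCnt adj V := by
        refine pvCntAux_lt _ _ _ v (h v (List.mem_cons_self)) hvV ?_ ?_
        · exact (PySem.Set.mem_add V v v).mpr (Or.inr rfl)
        · intro x hx; exact (PySem.Set.mem_add V v x).mpr (Or.inl hx)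
      rcases ih (q ++ [(v, d + 1)]) (PySem.Set.add V v)
          (PySem.Set.add E (u, v))
          (fun w hw => h w (List.mem_cons_of_mem _ hw)) with ⟨hV, _⟩ | hlt
      · exact Or.inr (by rw [hV]; exact hVlt)
      · exact Or.inr (lt_trans hlt hVlt)

def pvLoopB (adj : List (String × List String)) (depth : Int)
    (q : List (String × Int)) (V : PySem.Set String)
    (E : PySem.Set (String × String)) : PySem.Set (String × String) :=
  match q with
  | [] => E
  | (u, d) :: rest =>
    if d ≥ depth then pvLoopB adj depth rest V E
    else
      let s := pvBInner u d (pvNbrs adj u) rest V E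
      pvLoopB adj depth s.1 s.2.1 s.2.2
termination_by (pvCnt adj V, q.length)
decreasing_by
  · apply Prod.Lex.right
    simp
  · rcases pvBInner_dec adj u d (pvNbrs adj u) rest V E
        (fun w hw => mem_pvNbrs_allN adj u w hw) with ⟨hV, hq⟩ | hlt
    · rw [hV, hq]
      apply Prod.Lex.right
      simp
    · exact Prod.Lex.left _ _ hlt

def subtree_edges_py_alt (root : String) (adj : List (String × List String)) (depth : Int) : List (String × String) :=
  pvLoopB adj depth [(root, 0)] (PySem.Set.ofList [root]) PySem.Set.empty


-- ===== PRECONDITION & SPEC =====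
def Spec_subtree_edges_py (root : String) (adj : List (String × List String)) (depth : Int) (out : List (String × String)) : Prop := out = subtree_edges_py_alt root adj depth
instance (root : String) (adj : List (String × List String)) (depth : Int) (out : List (String × String)) : Decidable (Spec_subtree_edges_py root adj depth out) := by unfold Spec_subtree_edges_py; infer_instance

-- ===== CLAIM (what is proved, stated in full; the proofs are below) =====
def Claim_equal_subtree_edges_py : Prop := ∀ (root : String) (adj : List (String × List String)) (depth : Int), Dom_subtree_edges_py root adj depth → Spec_subtree_edges_py root adj depth (subtree_edges_py root adj depth)

-- ===== LEMMAS AND PROOFS =====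

-- unfolding equations for the two loops
lemma pvLoopA_nil (adj : List (String × List String)) (depth : Int) (E : PySem.Set (String × String)) :
    pvLoopA adj depth [] E = E := by
  rw [pvLoopA]

lemma pvLoopA_cons (adj : List (String × List String)) (depth : Int) (u : String) (d : Int)
    (rest : List (String × Int)) (E : PySem.Set (String × String)) :
    pvLoopA adj depth ((u, d) :: rest) E =
      if d ≥ depth then pvLoopA adj depth rest E
      else pvLoopA adj depth (pvAInner u d (pvNbrs adj u) rest E).1
             (pvAInner u d (pvNbrs adj u) rest E).2 := by
  rw [pvLoopA]

lemma pvLoopB_nil (adj : List (String × List String)) (depth : Int) (V : PySem.Set String)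
    (E : PySem.Set (String × String)) :
    pvLoopB adj depth [] V E = E := by
  rw [pvLoopB]

lemma pvLoopB_cons (adj : List (String × List String)) (depth : Int) (u : String) (d : Int)
    (rest : List (String × Int)) (V : PySem.Set String) (E : PySem.Set (String × String)) :
    pvLoopB adj depth ((u, d) :: rest) V E =
      if d ≥ depth then pvLoopB adj depth rest V E
      else pvLoopB adj depth (pvBInner u d (pvNbrs adj u) rest V E).1
             (pvBInner u d (pvNbrs adj u) rest V E).2.1
             (pvBInner u d (pvNbrs adj u) rest V E).2.2 := by
  rw [pvLoopB]

-- ghost projection: first occurrences in A's queue of nodes not in S (B's pending queue)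
def pvCanon (S : List String) : List (String × Int) → List (String × Int)
  | [] => []
  | (u, d) :: rest => if u ∈ S then pvCanon S rest else (u, d) :: pvCanon (u :: S) rest

-- the accumulated set after pvCanon has scanned a prefix
def pvAcc (S : List String) : List (String × Int) → List String
  | [] => S
  | (u, _) :: rest => pvAcc (if u ∈ S then S else u :: S) rest

lemma pvCanon_congr (S S' : List String) (l : List (String × Int))
    (h : ∀ x, x ∈ S ↔ x ∈ S') : pvCanon S l = pvCanon S' l := by
  induction l generalizing S S' with
  | nil => rfl
  | cons p rest ih =>
    obtain ⟨u, d⟩ := p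
    simp only [pvCanon]
    by_cases hu : u ∈ S
    · rw [if_pos hu, if_pos ((h u).mp hu)]
      exact ih S S' h
    · rw [if_neg hu, if_neg (fun hx => hu ((h u).mpr hx))]
      refine congrArg _ (ih (u :: S) (u :: S') ?_)
      intro x
      simp only [List.mem_cons]
      exact or_congr Iff.rfl (h x)

lemma mem_pvAcc (l : List (String × Int)) (S : List String) (x : String) :
    x ∈ pvAcc S l ↔ x ∈ S ∨ x ∈ l.map Prod.fst := by
  induction l generalizing S with
  | nil => simp [pvAcc]
  | cons p rest ih =>
    obtain ⟨u, d⟩ := p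
    simp only [pvAcc, List.map_cons, List.mem_cons]
    by_cases hu : u ∈ S
    · rw [if_pos hu, ih]
      constructor
      · rintro (h | h)
        · exact Or.inl h
        · exact Or.inr (Or.inr h)
      · rintro (h | rfl | h)
        · exact Or.inl h
        · exact Or.inl hu
        · exact Or.inr h
    · rw [if_neg hu, ih]
      simp only [List.mem_cons]
      tauto

lemma pvCanon_append (a b : List (String × Int)) (S : List String) :
    pvCanon S (a ++ b) = pvCanon S a ++ pvCanon (pvAcc S a) b := by
  induction a generalizing S with
  | nil => simp [pvCanon, pvAcc]
  | cons p rest ih =>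
    obtain ⟨u, d⟩ := p
    simp only [List.cons_append, pvCanon, pvAcc]
    by_cases hu : u ∈ S
    · rw [if_pos hu, if_pos hu, ih]
      simp [hu]
    · rw [if_neg hu, if_neg hu, ih]
      simp [hu]

lemma pvCanon_sublist (l : List (String × Int)) (S : List String) :
    (pvCanon S l).Sublist l := by
  induction l generalizing S with
  | nil => simp [pvCanon]
  | cons p rest ih =>
    obtain ⟨u, d⟩ := p
    simp only [pvCanon]
    by_cases hu : u ∈ S
    · rw [if_pos hu]
      exact (ih S).cons _
    · rw [if_neg hu]
      exact (ih (u :: S)).cons₂ _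

lemma pvCanon_eq_nil (l : List (String × Int)) (S : List String)
    (h : ∀ p ∈ l, p.1 ∈ S) : pvCanon S l = [] := by
  induction l with
  | nil => rfl
  | cons p rest ih =>
    obtain ⟨u, d⟩ := p
    simp only [pvCanon, if_pos (h (u, d) (List.mem_cons_self))]
    exact ih (fun p hp => h p (List.mem_cons_of_mem _ hp))

lemma pvKeys_canon_cover (l : List (String × Int)) (S : List String) (x : String)
    (hx : x ∈ l.map Prod.fst) : x ∈ S ∨ x ∈ (pvCanon S l).map Prod.fst := by
  induction l generalizing S with
  | nil => simp at hx
  | cons p rest ih =>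
    obtain ⟨u, d⟩ := p
    simp only [List.map_cons, List.mem_cons] at hx
    simp only [pvCanon]
    by_cases hu : u ∈ S
    · rw [if_pos hu]
      rcases hx with rfl | hx
      · exact Or.inl hu
      · exact ih S hx
    · rw [if_neg hu]
      rcases hx with rfl | hx
      · exact Or.inr (by simp)
      · rcases ih (u :: S) hx with h | h
        · rcases List.mem_cons.mp h with rfl | h
          · exact Or.inr (by simp)
          · exact Or.inl h
        · exact Or.inr (by simp [h])

lemma pvKeys_canon_subset (l : List (String × Int)) (S : List String) (x : String)
    (hx : x ∈ (pvCanon S l).map Prod.fst) : x ∈ l.map Prod.fst :=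
  ((pvCanon_sublist l S).map Prod.fst).mem hx

lemma pvFoldAdd_eq (u : String) (l : List String) (E : PySem.Set (String × String))
    (h : ∀ v ∈ l, (u, v) ∈ E) :
    l.foldl (fun E v => PySem.Set.add E (u, v)) E = E := by
  induction l with
  | nil => rfl
  | cons v vs ih =>
    simp only [List.foldl_cons, PySem.Set.add_of_mem (h v (List.mem_cons_self))]
    exact ih (fun w hw => h w (List.mem_cons_of_mem _ hw))

lemma pvAInner_snd (u : String) (d : Int) :
    ∀ (nbrs : List String) q E,
      (pvAInner u d nbrs q E).2 = nbrs.foldl (fun E v => PySem.Set.add E (u, v)) E := by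
  intro nbrs
  induction nbrs with
  | nil => intro q E; rfl
  | cons v vs ih => intro q E; simp [pvAInner, ih]

lemma pvBInner_spec (u : String) (d : Int) :
    ∀ (nbrs : List String) (q : List (String × Int)) V E (S : List String),
      (∀ x, x ∈ S ↔ x ∈ V) →
      (pvBInner u d nbrs q V E).1 = q ++ pvCanon S (nbrs.map (fun v => (v, d + 1)))
      ∧ (∀ x, x ∈ (pvBInner u d nbrs q V E).2.1 ↔ (x ∈ V ∨ x ∈ nbrs))
      ∧ (pvBInner u d nbrs q V E).2.2 = nbrs.foldl (fun E v => PySem.Set.add E (u, v)) E := by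
  intro nbrs
  induction nbrs with
  | nil =>
    intro q V E S h
    exact ⟨by simp [pvBInner, pvCanon], fun x => by simp [pvBInner], rfl⟩
  | cons v vs ih =>
    intro q V E S h
    simp only [pvBInner, List.map_cons, pvCanon, List.foldl_cons]
    by_cases hv : v ∈ V
    · have hcv : PySem.Set.contains V v = true := (PySem.Set.contains_iff V v).mpr hv
      rw [if_pos ((h v).mpr hv), if_pos hcv]
      obtain ⟨h1, h2, h3⟩ := ih q V (PySem.Set.add E (u, v)) S h
      refine ⟨h1, ?_, h3⟩
      intro x
      rw [h2 x]
      simp only [List.mem_cons]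
      constructor
      · rintro (hx | hx)
        · exact Or.inl hx
        · exact Or.inr (Or.inr hx)
      · rintro (hx | rfl | hx)
        · exact Or.inl hx
        · exact Or.inl hv
        · exact Or.inr hx
    · have hcv : PySem.Set.contains V v = false := by
        by_contra hc
        exact hv ((PySem.Set.contains_iff V v).mp (Bool.not_eq_false _ ▸ hc))
      have hvS : v ∉ S := fun hx => hv ((h v).mp hx)
      rw [if_neg hvS, if_neg (by simpa using hv)]
      have hS' : ∀ x, x ∈ v :: S ↔ x ∈ PySem.Set.add V v := by
        intro x
        rw [PySem.Set.mem_add, List.mem_cons, h x]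
        tauto
      obtain ⟨h1, h2, h3⟩ :=
        ih (q ++ [(v, d + 1)]) (PySem.Set.add V v) (PySem.Set.add E (u, v)) (v :: S) hS'
      refine ⟨by rw [h1]; simp, ?_, h3⟩
      intro x
      rw [h2 x, PySem.Set.mem_add]
      simp only [List.mem_cons]
      tauto

lemma pvPairwise_step (u : String) (d : Int) (restA : List (String × Int)) (l : List String)
    (h : ((u, d) :: restA).Pairwise (fun a b => a.2 ≤ b.2 ∧ b.2 ≤ a.2 + 1)) :
    (restA ++ l.map (fun v => (v, d + 1))).Pairwise
      (fun a b => a.2 ≤ b.2 ∧ b.2 ≤ a.2 + 1) := by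
  rcases List.pairwise_cons.mp h with ⟨hhead, htail⟩
  apply List.pairwise_append.mpr
  refine ⟨htail, ?_, ?_⟩
  · induction l with
    | nil => simp
    | cons v vs ihl =>
      simp only [List.map_cons, List.pairwise_cons]
      refine ⟨?_, ihl⟩
      intro b hb
      rcases List.mem_map.mp hb with ⟨w, _, rfl⟩
      exact ⟨le_refl _, by omega⟩
  · intro a ha b hb
    rcases List.mem_map.mp hb with ⟨w, _, rfl⟩
    have := hhead a ha
    exact ⟨by simp; omega, by simp; omega⟩

lemma pvMeasA_cons_pos (depth : Int) (K : Nat) (u : String) (d : Int)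
    (rest : List (String × Int)) : 0 < pvMeasA depth K ((u, d) :: rest) := by
  simp only [pvMeasA, List.map_cons, List.sum_cons]
  have := pow_pos (show 0 < K + 1 by omega) (depth - d).toNat
  omega

-- the simulation invariant between A's state and B's state
-- (Xg = nodes expanded with d < depth; Xb = nodes whose first occurrence was dropped, d ≥ depth)
def pvInv (adj : List (String × List String)) (depth : Int) (Xg Xb : List String)
    (QA QB : List (String × Int)) (V : PySem.Set String)
    (E : PySem.Set (String × String)) : Prop :=
  pvCanon (Xg ++ Xb) QA = QB ∧
  (∀ x, x ∈ V ↔ (x ∈ Xg ∨ x ∈ Xb ∨ x ∈ QB.map Prod.fst)) ∧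
  QA.Pairwise (fun a b => a.2 ≤ b.2 ∧ b.2 ≤ a.2 + 1) ∧
  (∀ w ∈ Xg, ∀ v ∈ pvNbrs adj w, (w, v) ∈ E ∧ v ∈ V) ∧
  (Xb ≠ [] → ∀ p ∈ QA, depth ≤ p.2)

theorem pvSim (adj : List (String × List String)) (depth : Int) :
    ∀ (n : Nat) (QA QB : List (String × Int)) (Xg Xb : List String)
      (V : PySem.Set String) (E : PySem.Set (String × String)),
      pvMeasA depth (pvKmax adj) QA ≤ n →
      pvInv adj depth Xg Xb QA QB V E →
      pvLoopA adj depth QA E = pvLoopB adj depth QB V E := by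
  intro n
  induction n with
  | zero =>
    intro QA QB Xg Xb V E hm hinv
    cases QA with
    | nil =>
      obtain ⟨hc, -, -, -, -⟩ := hinv
      simp only [pvCanon] at hc
      rw [pvLoopA_nil, ← hc, pvLoopB_nil]
    | cons p rest =>
      obtain ⟨u, d⟩ := p
      exact absurd hm
        (by have := pvMeasA_cons_pos depth (pvKmax adj) u d rest; omega)
  | succ n ih =>
    intro QA QB Xg Xb V E hm hinv
    cases QA with
    | nil =>
      obtain ⟨hc, -, -, -, -⟩ := hinv
      simp only [pvCanon] at hc
      rw [pvLoopA_nil, ← hc, pvLoopB_nil]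
    | cons p restA =>
      obtain ⟨u, d⟩ := p
      obtain ⟨hc, hV, hpw, hXg, hXb⟩ := hinv
      rw [pvLoopA_cons]
      by_cases hX : u ∈ Xg ++ Xb
      · -- duplicate occurrence of u in A's queue: B's state does not move
        have hc' : pvCanon (Xg ++ Xb) restA = QB := by
          simpa [pvCanon, hX] using hc
        by_cases hd : d ≥ depth
        · rw [if_pos hd]
          apply ih restA QB Xg Xb V E
          · have := pvMeasA_dec_skip depth (pvKmax adj) u d restA; omega
          · exact ⟨hc', hV, hpw.of_cons, hXg,
              fun h p hp => hXb h p (List.mem_cons_of_mem _ hp)⟩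
        · rw [if_neg hd]
          have hdlt : d < depth := by omega
          have hXgu : u ∈ Xg := by
            rcases List.mem_append.mp hX with h | h
            · exact h
            · exfalso
              have hne : Xb ≠ [] := by intro hnil; rw [hnil] at h; simp at h
              have := hXb hne (u, d) List.mem_cons_self
              omega
          have hed := hXg u hXgu
          rw [pvAInner_fst, pvAInner_snd,
            pvFoldAdd_eq u (pvNbrs adj u) E (fun v hv => (hed v hv).1)]
          apply ih (restA ++ (pvNbrs adj u).map (fun v => (v, d + 1))) QB Xg Xb V E
          · have := pvMeasA_dec_expand depth (pvKmax adj) u d restA (pvNbrs adj u)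
              hdlt (pvNbrs_len_le adj u)
            omega
          refine ⟨?_, hV, pvPairwise_step u d restA _ hpw, hXg, ?_⟩
          · have hnil2 : pvCanon (pvAcc (Xg ++ Xb) restA)
                ((pvNbrs adj u).map (fun v => (v, d + 1))) = [] := by
              apply pvCanon_eq_nil
              intro p hp
              rcases List.mem_map.mp hp with ⟨v, hv, rfl⟩
              rw [mem_pvAcc]
              rcases (hV v).mp (hed v hv).2 with h | h | h
              · exact Or.inl (List.mem_append.mpr (Or.inl h))
              · exact Or.inl (List.mem_append.mpr (Or.inr h))
              · exact Or.inr (pvKeys_canon_subset restA (Xg ++ Xb) v (by rw [hc']; exact h))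
            rw [pvCanon_append, hc', hnil2, List.append_nil]
          · intro hnil p hp
            exact absurd (hXb hnil (u, d) List.mem_cons_self) (by omega)
      · -- first occurrence of u: B pops the same head
        have hc2 : QB = (u, d) :: pvCanon (u :: (Xg ++ Xb)) restA := by
          rw [← hc]; simp [pvCanon, hX]
        rw [hc2, pvLoopB_cons]
        by_cases hd : d ≥ depth
        · rw [if_pos hd, if_pos hd]
          apply ih restA (pvCanon (u :: (Xg ++ Xb)) restA) Xg (u :: Xb) V E
          · have := pvMeasA_dec_skip depth (pvKmax adj) u d restA; omega
          refine ⟨?_, ?_, hpw.of_cons, hXg, ?_⟩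
          · apply pvCanon_congr
            intro x
            simp only [List.mem_append, List.mem_cons]
            tauto
          · intro x
            rw [hV x, hc2]
            simp only [List.map_cons, List.mem_cons]
            tauto
          · intro _ p hp
            have h1 := (List.pairwise_cons.mp hpw).1 p hp
            omega
        · rw [if_neg hd, if_neg hd]
          have hdlt : d < depth := by omega
          have hXbnil : ∀ (C : Prop), Xb ≠ [] → C := by
            intro C hnil
            exact absurd (hXb hnil (u, d) List.mem_cons_self) (by omega)
          have hSV : ∀ x, x ∈ pvAcc (u :: (Xg ++ Xb)) restA ↔ x ∈ V := by
            intro x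
            rw [mem_pvAcc, hV x, hc2]
            simp only [List.mem_cons, List.mem_append, List.map_cons]
            constructor
            · rintro ((rfl | hx | hx) | hx)
              · right; right; left; rfl
              · exact Or.inl hx
              · exact Or.inr (Or.inl hx)
              · rcases pvKeys_canon_cover restA (u :: (Xg ++ Xb)) x hx with hx | hx
                · rcases List.mem_cons.mp hx with rfl | hx
                  · right; right; left; rfl
                  · rcases List.mem_append.mp hx with hx | hx
                    · exact Or.inl hx
                    · exact Or.inr (Or.inl hx)
                · right; right; right; exact hx
            · rintro (hx | hx | rfl | hx)
              · exact Or.inl (Or.inr (Or.inl hx))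
              · exact Or.inl (Or.inr (Or.inr hx))
              · exact Or.inl (Or.inl rfl)
              · exact Or.inr (pvKeys_canon_subset restA (u :: (Xg ++ Xb)) x hx)
          obtain ⟨hb1, hb2, hb3⟩ := pvBInner_spec u d (pvNbrs adj u)
            (pvCanon (u :: (Xg ++ Xb)) restA) V E (pvAcc (u :: (Xg ++ Xb)) restA) hSV
          rw [pvAInner_fst, pvAInner_snd, hb1, hb3]
          apply ih (restA ++ (pvNbrs adj u).map (fun v => (v, d + 1)))
            (pvCanon (u :: (Xg ++ Xb)) restA ++
              pvCanon (pvAcc (u :: (Xg ++ Xb)) restA)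
                ((pvNbrs adj u).map (fun v => (v, d + 1))))
            (u :: Xg) Xb
            (pvBInner u d (pvNbrs adj u) (pvCanon (u :: (Xg ++ Xb)) restA) V E).2.1
            ((pvNbrs adj u).foldl (fun E v => PySem.Set.add E (u, v)) E)
          · have := pvMeasA_dec_expand depth (pvKmax adj) u d restA (pvNbrs adj u)
              hdlt (pvNbrs_len_le adj u)
            omega
          refine ⟨?_, ?_, pvPairwise_step u d restA _ hpw, ?_, fun hnil => hXbnil _ hnil⟩
          · rw [List.cons_append, pvCanon_append]
          · intro x
            rw [hb2 x]
            simp only [List.mem_cons, List.map_append, List.mem_append]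
            constructor
            · rintro (hx | hx)
              · rcases (hV x).mp hx with h3 | h3 | h3
                · exact Or.inl (Or.inr h3)
                · exact Or.inr (Or.inl h3)
                · rw [hc2] at h3
                  simp only [List.map_cons, List.mem_cons] at h3
                  rcases h3 with rfl | h3
                  · exact Or.inl (Or.inl rfl)
                  · exact Or.inr (Or.inr (Or.inl h3))
              · have hx' : x ∈ ((pvNbrs adj u).map (fun v => (v, d + 1))).map Prod.fst := by
                  simp only [List.map_map]
                  exact List.mem_map.mpr ⟨x, hx, rfl⟩
                rcases pvKeys_canon_cover _ (pvAcc (u :: (Xg ++ Xb)) restA) x hx' with hx2 | hx2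
                · rcases (hV x).mp ((hSV x).mp hx2) with h3 | h3 | h3
                  · exact Or.inl (Or.inr h3)
                  · exact Or.inr (Or.inl h3)
                  · rw [hc2] at h3
                    simp only [List.map_cons, List.mem_cons] at h3
                    rcases h3 with rfl | h3
                    · exact Or.inl (Or.inl rfl)
                    · exact Or.inr (Or.inr (Or.inl h3))
                · exact Or.inr (Or.inr (Or.inr hx2))
            · rintro ((rfl | hx) | hx | hx | hx)
              · exact Or.inl ((hV x).mpr (Or.inr (Or.inr (by rw [hc2]; simp))))
              · exact Or.inl ((hV x).mpr (Or.inl hx))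
              · exact Or.inl ((hV x).mpr (Or.inr (Or.inl hx)))
              · refine Or.inl ((hV x).mpr (Or.inr (Or.inr ?_)))
                rw [hc2]
                simp only [List.map_cons, List.mem_cons]
                exact Or.inr hx
              · right
                have h5 := pvKeys_canon_subset _ (pvAcc (u :: (Xg ++ Xb)) restA) x hx
                simpa [List.map_map] using h5
          · intro w hw v hv
            rcases List.mem_cons.mp hw with rfl | hw
            · constructor
              · exact (PySem.Set.mem_foldl_add (pvNbrs adj w) (fun x => (w, x)) E (w, v)).mpr (Or.inr ⟨v, hv, rfl⟩)
              · exact (hb2 v).mpr (Or.inr hv)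
            · obtain ⟨hE1, hV1⟩ := hXg w hw v hv
              constructor
              · exact (PySem.Set.mem_foldl_add (pvNbrs adj u) (fun x => (u, x)) E (w, v)).mpr (Or.inl hE1)
              · exact (hb2 v).mpr (Or.inl hV1)

-- ===== VERDICT (by name: the statement is the Claim_ definition above) =====
theorem subtree_edges_py_spec : Claim_equal_subtree_edges_py := by
  intro root adj depth _
  unfold Spec_subtree_edges_py subtree_edges_py subtree_edges_py_alt
  refine pvSim adj depth (pvMeasA depth (pvKmax adj) [(root, 0)]) _ _ [] [] _ _ (le_refl _) ?_
  refine ⟨by simp [pvCanon], ?_, by simp, by simp, fun h => absurd rfl h⟩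
  intro x
  simp [PySem.Set.mem_ofList]
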